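-- pv_equiv track=rewrite | github.com/soyukke/lean-unsolved | scripts/collatz_mod16_eigen_structure.py | build_v2_transition_matrix_sampling
-- ===== SOURCE A (Python) =====
-- from collections import defaultdict
--
-- def v2(n):
--     """2-adic valuation"""
--     if n == 0:
--         return float('inf')
--     k = 0
--     while n % 2 == 0:
--         n //= 2
--         k += 1
--     return k
--
-- def build_v2_transition_matrix_sampling(N, max_v2=8):
--     """
--     大量の奇数 n に対して実際の軌道を追い、v2 遷移を統計的に計算。
--     """
--     v2_pairs = defaultdict(lambda: defaultdict(int))
--     v2_count = defaultdict(int)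
--
--     for n in range(1, 2*N, 2):  # 奇数のみ
--         val = 3 * n + 1
--         v_curr = min(v2(val), max_v2)
--         t_n = val >> v2(val)
--         val_next = 3 * t_n + 1
--         v_next = min(v2(val_next), max_v2)
--
--         v2_pairs[v_curr][v_next] += 1
--         v2_count[v_curr] += 1
--
--     return v2_pairs, v2_count
-- ===== SOURCE B (Python) =====
-- from collections import Counter
--
-- def _v2(n):
--     """2-adic valuation of n > 0, recursively."""
--     return 0 if n % 2 else 1 + _v2(n // 2)
--
-- def _transition(n, max_v2):
--     """(capped v2 of 3n+1, capped v2 of 3*T(n)+1) for odd n > 0."""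
--     val = 3 * n + 1
--     j = _v2(val)
--     t = val >> j
--     return min(j, max_v2), min(_v2(3 * t + 1), max_v2)
--
-- def build_v2_transition_matrix_sampling(N, max_v2=8):
--     # map first, then group: list of transitions, keys in first-occurrence order,
--     # inner tallies per key via Counter over the key's subsequence
--     ps = [_transition(n, max_v2) for n in range(1, 2 * N, 2)]
--     keys = list(dict.fromkeys(vc for vc, _ in ps))
--     v2_pairs = {k: Counter(vn for vc, vn in ps if vc == k) for k in keys}
--     v2_count = {k: len([1 for vc, _ in ps if vc == k]) for k in keys}
--     return v2_pairs, v2_count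
-- ===== Notes on version B (the rewrite author's own statement) =====
-- stated objective: alternative
-- what changed: A streams the odd numbers once, incrementing nested defaultdict counters in place; B first maps each odd n to its (v_curr, v_next) transition pair, then builds the result by group-by: first-occurrence key list via dict.fromkeys, a Counter per key's subsequence, and group sizes for the counts.
import Mathlib
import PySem

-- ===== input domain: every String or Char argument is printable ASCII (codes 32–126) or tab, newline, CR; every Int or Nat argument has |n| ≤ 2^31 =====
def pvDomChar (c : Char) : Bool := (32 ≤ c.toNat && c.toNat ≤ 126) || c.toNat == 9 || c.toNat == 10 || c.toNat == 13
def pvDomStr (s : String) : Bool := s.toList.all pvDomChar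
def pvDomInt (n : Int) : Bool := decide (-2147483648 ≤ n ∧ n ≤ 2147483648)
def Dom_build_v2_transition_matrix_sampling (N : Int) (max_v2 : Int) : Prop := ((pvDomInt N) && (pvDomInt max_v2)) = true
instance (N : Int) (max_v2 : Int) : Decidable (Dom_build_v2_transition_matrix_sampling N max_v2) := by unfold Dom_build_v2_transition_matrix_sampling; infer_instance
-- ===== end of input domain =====

-- B replaces A's streaming nested-defaultdict counters by a map-then-group-by decomposition
-- (list of transitions, then first-occurrence keys, Counter per group); objective: alternative, same cost.

-- ===== PORT A =====
-- A's v2 while-loop (`while n % 2 == 0: n //= 2; k += 1`) as recursion; at n = 0 Python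
-- returns float('inf'), which is unreachable here (v2 is only applied to 3*m+1 with m ≥ 1),
-- so the n = 0 branch returns 0.
def pyV2 (n : Int) : Int :=
  if _h0 : n = 0 then 0
  else if _h : PySem.Int.mod n 2 = 0 then 1 + pyV2 (PySem.Int.floordiv n 2)
  else 0
termination_by n.natAbs
decreasing_by
  rw [PySem.Int.floordiv_eq_ediv_of_pos (by omega : (0:Int) < 2)]
  rw [PySem.Int.mod_eq_emod_of_pos (by omega : (0:Int) < 2)] at _h
  omega

def build_v2_transition_matrix_sampling (N : Int) (max_v2 : Int) : (List (Int × List (Int × Int))) × (List (Int × Int)) :=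
  let st := (PySem.List.pyRange 1 (2*N) 2).foldl (fun st n =>
      let val := 3*n + 1
      let v_curr := min (pyV2 val) max_v2
      let t_n := val >>> (pyV2 val).toNat   -- val >> v2(val); shift count = pyV2 val ≥ 0
      let val_next := 3*t_n + 1
      let v_next := min (pyV2 val_next) max_v2
      (st.1.modify v_curr PySem.Dict.empty (fun inner => inner.modify v_next 0 (· + 1)),
       st.2.modify v_curr 0 (· + 1)))
    ((PySem.Dict.empty : PySem.Dict Int (PySem.Dict Int Int)), (PySem.Dict.empty : PySem.Dict Int Int))
  (st.1.items.map (fun kv => (kv.1, kv.2.items)), st.2.items)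

-- ===== PORT B =====
-- B's recursive v2: `return 0 if n % 2 else 1 + _v2(n // 2)`; the n = 0 branch is a totality
-- guard (in Python the recursion is only ever applied to n > 0).
def altV2 (n : Int) : Int :=
  if PySem.Int.mod n 2 ≠ 0 then 0
  else if _h0 : n = 0 then 0
  else 1 + altV2 (PySem.Int.floordiv n 2)
termination_by n.natAbs
decreasing_by
  rename_i h
  rw [PySem.Int.floordiv_eq_ediv_of_pos (by omega : (0:Int) < 2)]
  rw [PySem.Int.mod_eq_emod_of_pos (by omega : (0:Int) < 2)] at h
  simp at h
  omega

def altTransition (max_v2 : Int) (n : Int) : Int × Int :=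
  let val := 3*n + 1
  let j := altV2 val
  let t := val >>> j.toNat
  (min j max_v2, min (altV2 (3*t + 1)) max_v2)

def build_v2_transition_matrix_sampling_alt (N : Int) (max_v2 : Int) : (List (Int × List (Int × Int))) × (List (Int × Int)) :=
  let ps := (PySem.List.pyRange 1 (2*N) 2).map (altTransition max_v2)
  let keys := PySem.List.dedup (ps.map (·.1))
  (keys.map (fun k => (k, (PySem.Dict.counter ((ps.filter (fun p => p.1 == k)).map (·.2))).items)),
   keys.map (fun k => (k, (((ps.filter (fun p => p.1 == k)).map (fun _ => (1:Int))).length : Int))))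

-- ===== PRECONDITION & SPEC =====
def Spec_build_v2_transition_matrix_sampling (N : Int) (max_v2 : Int) (out : (List (Int × List (Int × Int))) × (List (Int × Int))) : Prop := out = build_v2_transition_matrix_sampling_alt N max_v2
instance (N : Int) (max_v2 : Int) (out : (List (Int × List (Int × Int))) × (List (Int × Int))) : Decidable (Spec_build_v2_transition_matrix_sampling N max_v2 out) := by unfold Spec_build_v2_transition_matrix_sampling; infer_instance

-- ===== CLAIM (what is proved, stated in full; the proofs are below) =====
def Claim_equal_build_v2_transition_matrix_sampling : Prop := ∀ (N : Int) (max_v2 : Int), Dom_build_v2_transition_matrix_sampling N max_v2 → Spec_build_v2_transition_matrix_sampling N max_v2 (build_v2_transition_matrix_sampling N max_v2)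

-- ===== LEMMAS AND PROOFS =====

-- the two v2 helpers compute the same value on every Int
theorem pyV2_eq_altV2 (n : Int) : pyV2 n = altV2 n := by
  rw [pyV2, altV2]
  split_ifs with h0 h1 h1 <;> try rfl
  · exact absurd h0 (by simp_all)
  · rw [pyV2_eq_altV2]
termination_by n.natAbs
decreasing_by
  rw [PySem.Int.floordiv_eq_ediv_of_pos (by omega : (0:Int) < 2)]
  rw [PySem.Int.mod_eq_emod_of_pos (by omega : (0:Int) < 2)] at h1
  simp at h1
  omega

-- a fold over l whose two state components evolve independently through f is the pair of folds over l.map f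
theorem foldl_split_map {α β γ κ : Type} (l : List α) (f : α → κ) (g1 : β → κ → β) (g2 : γ → κ → γ)
    (b : β) (c : γ) :
    l.foldl (fun st a => (g1 st.1 (f a), g2 st.2 (f a))) (b, c) = ((l.map f).foldl g1 b, (l.map f).foldl g2 c) := by
  induction l generalizing b c with
  | nil => rfl
  | cons x xs ih => simpa using ih (g1 b (f x)) (g2 c (f x))

-- per-key group counter for the first component
def grp (ps : List (Int × Int)) (k : Int) : PySem.Dict Int Int :=
  PySem.Dict.counter ((ps.filter (fun p => p.1 == k)).map (·.2))

-- A's nested-counter fold, characterised as B's group-by, proved by snoc induction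
-- one snoc step of the group counter
theorem grp_append_singleton (qs : List (Int × Int)) (p : Int × Int) (k : Int) :
    grp (qs ++ [p]) k = if p.1 = k then (grp qs k).modify p.2 0 (· + 1) else grp qs k := by
  by_cases h : p.1 = k
  · simp [grp, List.filter_append, h, PySem.Dict.counter_append_singleton]
  · simp [grp, List.filter_append, h]

theorem fold_pairs_eq (ps : List (Int × Int)) :
    ps.foldl (fun d p => d.modify p.1 PySem.Dict.empty (fun inner => inner.modify p.2 0 (· + 1)))
      (PySem.Dict.empty : PySem.Dict Int (PySem.Dict Int Int))
    = PySem.Dict.mk ((PySem.List.dedup (ps.map (·.1))).map (fun k => (k, grp ps k))) := by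
  induction ps using List.reverseRecOn with
  | nil => rfl
  | append_singleton qs p ih =>
    rw [List.foldl_append, ih, List.foldl_cons, List.foldl_nil]
    have hm : ∀ (d : PySem.Dict Int (PySem.Dict Int Int)) k f,
        d.modify k PySem.Dict.empty f = d.insert k (f (d.getD k PySem.Dict.empty)) := fun _ _ _ => rfl
    rw [hm]
    have hkeys : (PySem.Dict.mk ((PySem.List.dedup (qs.map (·.1))).map (fun k => (k, grp qs k)))).keys
        = PySem.List.dedup (qs.map (·.1)) := by
      show List.map _ _ = _
      rw [List.map_map]
      exact (List.map_congr_left (fun a _ => rfl)).trans (List.map_id _)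
    have hnd : (PySem.Dict.mk ((PySem.List.dedup (qs.map (·.1))).map (fun k => (k, grp qs k)))).keys.Nodup := by
      rw [hkeys]; exact PySem.List.nodup_dedup _
    apply PySem.Dict.ext
    by_cases hk : p.1 ∈ qs.map (·.1)
    · have hmem : p.1 ∈ PySem.List.dedup (qs.map (·.1)) := by
        simpa [PySem.List.mem_dedup] using hk
      have hcont : (PySem.Dict.mk ((PySem.List.dedup (qs.map (·.1))).map (fun k => (k, grp qs k)))).contains p.1 = true := by
        rw [PySem.Dict.contains_iff_mem_keys, hkeys]; exact hmem
      have hmemi : ((p.1, grp qs p.1) : Int × PySem.Dict Int Int)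
          ∈ (PySem.List.dedup (qs.map (·.1))).map (fun k => (k, grp qs k)) :=
        List.mem_map_of_mem hmem
      have hget : (PySem.Dict.mk ((PySem.List.dedup (qs.map (·.1))).map (fun k => (k, grp qs k)))).getD p.1 PySem.Dict.empty
          = grp qs p.1 :=
        PySem.Dict.getD_of_mem_items _ hmemi hnd _
      rw [hget, PySem.Dict.items_insert_of_contains _ _ hcont]
      have hded : PySem.List.dedup ((qs ++ [p]).map (·.1)) = PySem.List.dedup (qs.map (·.1)) := by
        rw [List.map_append, List.map_singleton, PySem.List.dedup_eq_ofList,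
          PySem.Set.ofList_append_singleton, PySem.Set.add_of_mem (by simpa [PySem.Set.mem_ofList] using hk),
          ← PySem.List.dedup_eq_ofList]
      rw [hded]
      show (List.map _ _).map _ = _
      rw [List.map_map]
      refine List.map_congr_left (fun k hkmem => ?_)
      by_cases hpk : p.1 = k
      · subst hpk
        simp [grp_append_singleton]
      · have : ¬ ((k, grp qs k).1 == p.1) := by simp [Ne.symm hpk]
        simp only [Function.comp]
        rw [if_neg this, grp_append_singleton, if_neg hpk]
    · have hmem : p.1 ∉ PySem.List.dedup (qs.map (·.1)) := by
        simpa [PySem.List.mem_dedup] using hk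
      have hcont : (PySem.Dict.mk ((PySem.List.dedup (qs.map (·.1))).map (fun k => (k, grp qs k)))).contains p.1 = false := by
        rw [← Bool.not_eq_true, PySem.Dict.contains_iff_mem_keys, hkeys]; exact hmem
      have hget : (PySem.Dict.mk ((PySem.List.dedup (qs.map (·.1))).map (fun k => (k, grp qs k)))).getD p.1 PySem.Dict.empty
          = PySem.Dict.empty := PySem.Dict.getD_of_not_contains _ _ hcont
      rw [hget, PySem.Dict.items_insert_of_not_contains _ _ hcont]
      have hded : PySem.List.dedup ((qs ++ [p]).map (·.1)) = PySem.List.dedup (qs.map (·.1)) ++ [p.1] := by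
        rw [List.map_append, List.map_singleton, PySem.List.dedup_eq_ofList,
          PySem.Set.ofList_append_singleton, PySem.Set.add_of_not_mem (by simpa [PySem.Set.mem_ofList] using hk),
          ← PySem.List.dedup_eq_ofList]
      rw [hded, List.map_append, List.map_singleton]
      show _ = List.map _ _ ++ _
      have hfilq : qs.filter (fun q => q.1 == p.1) = [] := by
        rw [List.filter_eq_nil_iff]
        intro q hq
        simp only [beq_iff_eq]
        exact fun h => hk (h ▸ List.mem_map_of_mem hq)
      congr 1
      · refine List.map_congr_left (fun k hkmem => ?_)
        have hpk : p.1 ≠ k := fun h => hmem (h ▸ hkmem)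
        rw [grp_append_singleton, if_neg hpk]
      · rw [grp_append_singleton, if_pos rfl]
        simp [grp, hfilq]
        rfl

theorem fold_counts_eq (ps : List (Int × Int)) :
    (ps.foldl (fun d p => d.modify p.1 0 (· + 1)) (PySem.Dict.empty : PySem.Dict Int Int)).items
    = (PySem.List.dedup (ps.map (·.1))).map
        (fun k => (k, (((ps.filter (fun p => p.1 == k)).map (fun _ => (1:Int))).length : Int))) := by
  have h1 : ps.foldl (fun d p => d.modify p.1 0 (· + 1)) (PySem.Dict.empty : PySem.Dict Int Int)
      = PySem.Dict.counter (ps.map (·.1)) := by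
    rw [PySem.Dict.counter_eq_foldl, List.foldl_map]
  rw [h1, PySem.Dict.items_counter, ← PySem.List.dedup_eq_ofList]
  refine List.map_congr_left (fun k hkmem => ?_)
  congr 1
  rw [List.length_map]
  congr 1
  rw [List.count_eq_length_filter, List.filter_map, List.length_map]
  rfl

-- ===== VERDICT (by name: the statement is the Claim_ definition above) =====
theorem build_v2_transition_matrix_sampling_spec : Claim_equal_build_v2_transition_matrix_sampling := by
  intro N m _
  unfold Spec_build_v2_transition_matrix_sampling
  unfold build_v2_transition_matrix_sampling build_v2_transition_matrix_sampling_alt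
  have hstep : (fun (st : PySem.Dict Int (PySem.Dict Int Int) × PySem.Dict Int Int) n =>
      ((st.1.modify (min (pyV2 (3*n+1)) m) PySem.Dict.empty
          (fun inner => inner.modify (min (pyV2 (3*((3*n+1) >>> (pyV2 (3*n+1)).toNat)+1)) m) 0 (· + 1))),
        st.2.modify (min (pyV2 (3*n+1)) m) 0 (· + 1)))
      = (fun st n =>
        ((st.1.modify (altTransition m n).1 PySem.Dict.empty
            (fun inner => inner.modify (altTransition m n).2 0 (· + 1))),
          st.2.modify (altTransition m n).1 0 (· + 1))) := by
    funext st n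
    simp [altTransition, pyV2_eq_altV2]
  simp only []
  rw [hstep]
  rw [foldl_split_map (PySem.List.pyRange 1 (2*N) 2) (altTransition m)
    (fun (d : PySem.Dict Int (PySem.Dict Int Int)) (p : Int × Int) =>
      d.modify p.1 PySem.Dict.empty (fun inner => inner.modify p.2 0 (· + 1)))
    (fun (d : PySem.Dict Int Int) (p : Int × Int) => d.modify p.1 0 (· + 1))]
  rw [fold_pairs_eq, fold_counts_eq]
  simp [grp, Function.comp]
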